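-- pv_equiv track=rewrite | github.com/AppScale/appscale-tools | appscale/tools/utils.py | shortest_path_from_list
-- ===== SOURCE A (Python) =====
-- def shortest_path_from_list(file_name, name_list):
--   """ Determines the shortest path to a file in a list of candidates.
--
--   Args:
--     file_name: A string specifying the name of the matching candidates.
--     name_list: A list of strings specifying paths.
--   Returns:
--     A string specifying the candidate with the shortest path or None.
--   """
--   candidates = [path for path in name_list if path.split('/')[-1] == file_name]
--   if not candidates:
--     return None
--
--   shortest_path = candidates[0]
--   for candidate in candidates:
--     if len(candidate.split('/')) < len(shortest_path.split('/')):
--       shortest_path = candidate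
--
--   return shortest_path
-- ===== SOURCE B (Python) =====
-- def shortest_path_from_list(file_name, name_list):
--   """Shortest-path candidate matching file_name, via a stable sort on segment count."""
--   candidates = [path for path in name_list if path.split('/')[-1] == file_name]
--   if not candidates:
--     return None
--   return sorted(candidates, key=lambda p: len(p.split('/')))[0]
-- ===== Notes on version B (the rewrite author's own statement) =====
-- stated objective: idiomatic
-- what changed: Replaces the explicit running-minimum loop over the candidates with a stable sort by segment count and taking the first element; stability preserves A's first-minimal tie-breaking.
import Mathlib
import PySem

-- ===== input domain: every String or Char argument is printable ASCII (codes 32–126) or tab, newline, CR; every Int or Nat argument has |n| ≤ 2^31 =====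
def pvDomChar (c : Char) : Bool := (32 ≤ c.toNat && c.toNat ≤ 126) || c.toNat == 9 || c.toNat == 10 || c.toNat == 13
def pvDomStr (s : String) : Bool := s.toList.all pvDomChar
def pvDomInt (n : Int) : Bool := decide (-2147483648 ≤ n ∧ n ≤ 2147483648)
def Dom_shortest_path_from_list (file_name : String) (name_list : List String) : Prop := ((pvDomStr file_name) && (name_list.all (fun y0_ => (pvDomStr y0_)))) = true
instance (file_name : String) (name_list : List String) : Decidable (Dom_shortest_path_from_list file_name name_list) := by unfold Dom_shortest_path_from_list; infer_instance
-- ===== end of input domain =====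

-- B replaces A's running-minimum loop with a stable sort by segment count and taking the head (idiomatic).


-- ===== PORT A =====
-- path.split('/'): the separator is the nonempty literal "/", so split? is always `some`
def pvSplitSlash (path : String) : List String := (PySem.Str.split? path "/").getD []

def shortest_path_from_list (file_name : String) (name_list : List String) : Option String :=
  let candidates := name_list.filter (fun path => PySem.List.pyGet? (pvSplitSlash path) (-1) == some file_name)
  match candidates with
  | [] => none
  | c0 :: _ =>
    some (candidates.foldl
      (fun shortest candidate =>
        if (pvSplitSlash candidate).length < (pvSplitSlash shortest).length then candidate else shortest)
      c0)

-- ===== PORT B =====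
def shortest_path_from_list_alt (file_name : String) (name_list : List String) : Option String :=
  let candidates := name_list.filter (fun path => PySem.List.pyGet? (pvSplitSlash path) (-1) == some file_name)
  if candidates = [] then none
  else (PySem.List.sorted candidates (fun p => (pvSplitSlash p).length) false).head?

-- ===== PRECONDITION & SPEC =====
def Spec_shortest_path_from_list (file_name : String) (name_list : List String) (out : Option String) : Prop := out = shortest_path_from_list_alt file_name name_list
instance (file_name : String) (name_list : List String) (out : Option String) : Decidable (Spec_shortest_path_from_list file_name name_list out) := by unfold Spec_shortest_path_from_list; infer_instance

-- ===== CLAIM (what is proved, stated in full; the proofs are below) =====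
def Claim_equal_shortest_path_from_list : Prop := ∀ (file_name : String) (name_list : List String), Dom_shortest_path_from_list file_name name_list → Spec_shortest_path_from_list file_name name_list (shortest_path_from_list file_name name_list)

-- ===== LEMMAS AND PROOFS =====

-- Head of the insertion-sort fold equals the strict-< running minimum fold (stability:
-- insertBy puts x after existing equal keys, so the head only changes on a strict decrease).
theorem head_foldl_insertBy {α : Type} (key : α → Nat) :
    ∀ (l : List α) (x : α) (ys : List α),
      (l.foldl (fun acc c => PySem.List.insertBy (fun a b => decide (key a < key b)) c acc) (x :: ys)).head?
        = some (l.foldl (fun b c => if key c < key b then c else b) x) := by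
  intro l
  induction l with
  | nil => intro x ys; rfl
  | cons c t ih =>
    intro x ys
    simp only [List.foldl_cons, PySem.List.insertBy]
    by_cases h : key c < key x
    · simp [h, ih]
    · simp [h, ih]

-- ===== VERDICT (by name: the statement is the Claim_ definition above) =====
theorem shortest_path_from_list_spec : Claim_equal_shortest_path_from_list := by
  intro file_name name_list _
  unfold Spec_shortest_path_from_list shortest_path_from_list shortest_path_from_list_alt
  cases h : name_list.filter (fun path => PySem.List.pyGet? (pvSplitSlash path) (-1) == some file_name) with
  | nil => simp
  | cons c0 t =>
    simp only
    rw [if_neg (by simp)]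
    rw [PySem.List.sorted_eq_foldl_insertBy]
    simp only [List.foldl_cons, PySem.List.insertBy]
    rw [head_foldl_insertBy]
    simp
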